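-- pv_equiv track=rewrite | github.com/Oichkatzelesfrettschen/ancient-compute | hardware_twin/de_tabulator.py | compute_initial_differences
-- ===== SOURCE A (Python) =====
-- from typing import List, Optional
--
-- def compute_initial_differences(
--     coefficients: List[int],
--     num_columns: int = 8,
-- ) -> List[int]:
--     """Compute initial difference values for a polynomial.
--
--     Given polynomial coefficients [a0, a1, a2, ...] representing
--     f(x) = a0 + a1*x + a2*x^2 + ..., compute the initial row of
--     finite differences needed by the DE tabulator.
--
--     The k-th order difference of a degree-n polynomial is:
--       D^k f(0) = sum_{j=0}^{k} (-1)^{k-j} C(k,j) * f(j)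
--
--     Args:
--         coefficients: Polynomial coefficients [a0, a1, a2, ...]
--         num_columns: Number of difference columns (must be >= degree+1)
--
--     Returns:
--         List of initial differences [D0, D1, D2, ..., D_{num_columns-1}]
--     """
--     degree = len(coefficients) - 1
--
--     def poly_eval(x: int) -> int:
--         result = 0
--         for i, c in enumerate(coefficients):
--             result += c * (x ** i)
--         return result
--
--     # Compute f(0), f(1), f(2), ..., f(num_columns-1)
--     values = [poly_eval(x) for x in range(num_columns)]
--
--     # Forward differences: D^k[0] = sum of (-1)^{k-j} * C(k,j) * f(j)
--     differences = list(values)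
--     for order in range(1, num_columns):
--         new_diffs = []
--         for i in range(len(differences) - 1):
--             new_diffs.append(differences[i + 1] - differences[i])
--         differences = new_diffs
--
--         # After `order` rounds of differencing, differences[0] = D^order[0]
--         # But we need to collect them differently...
--
--     # Simpler approach: build the difference table directly
--     table = [values]
--     for order in range(1, num_columns):
--         row = []
--         prev = table[-1]
--         for i in range(len(prev) - 1):
--             row.append(prev[i + 1] - prev[i])
--         table.append(row)
--
--     # Initial differences are the first element of each row
--     result = [table[i][0] if i < len(table) and table[i] else 0
--               for i in range(num_columns)]
--
--     return result
-- ===== SOURCE B (Python) =====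
-- def compute_initial_differences(coefficients, num_columns=8):
--     def poly_eval(x):
--         result = 0
--         for i, c in enumerate(coefficients):
--             result += c * (x ** i)
--         return result
--
--     values = [poly_eval(x) for x in range(num_columns)]
--     result = []
--     for k in range(num_columns):
--         s, c = 0, 1  # c == C(k, j) throughout
--         for j in range(k + 1):
--             s += (-1) ** (k - j) * c * values[j]
--             c = c * (k - j) // (j + 1)
--         result.append(s)
--     return result
-- ===== Notes on version B (the rewrite author's own statement) =====
-- stated objective: simpler
-- what changed: B drops A's dead first differencing loop and the full difference table, computing each initial difference directly from the closed form D^k f(0) = sum_j (-1)^(k-j) C(k,j) f(j) stated in A's own docstring, with the binomial coefficient maintained incrementally (c = c*(k-j)//(j+1)).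
import Mathlib
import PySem

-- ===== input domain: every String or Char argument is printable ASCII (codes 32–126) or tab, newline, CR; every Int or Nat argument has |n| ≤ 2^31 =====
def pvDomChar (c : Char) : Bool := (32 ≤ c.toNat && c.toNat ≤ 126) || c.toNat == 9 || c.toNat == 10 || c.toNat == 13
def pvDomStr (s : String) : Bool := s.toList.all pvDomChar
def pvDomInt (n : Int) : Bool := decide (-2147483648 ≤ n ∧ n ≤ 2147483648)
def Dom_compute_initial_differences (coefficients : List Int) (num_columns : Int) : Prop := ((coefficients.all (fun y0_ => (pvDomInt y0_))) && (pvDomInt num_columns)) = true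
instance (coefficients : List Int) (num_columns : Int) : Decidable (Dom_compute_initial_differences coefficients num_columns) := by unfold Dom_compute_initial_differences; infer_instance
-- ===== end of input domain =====

-- B replaces A's dead differencing loop and full O(n^2) difference table by the closed-form
-- D^k f(0) = sum_j (-1)^(k-j) C(k,j) f(j) that A's own docstring states (objective: simpler).


-- ===== PORT A =====
-- poly_eval: result += c * x ** i over enumerate(coefficients); x ** i = x ^ i.toNat (i ≥ 0 here, exact)
def pvPolyEvalA (coefficients : List Int) (x : Int) : Int :=
  (PySem.List.enumerate coefficients).foldl (fun result ic => result + ic.2 * x ^ ic.1.toNat) 0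

-- A's inner loop "for i in range(len(prev)-1): row.append(prev[i+1]-prev[i])" (indices in range, pyGetD exact)
def pvDiffRowA (prev : List Int) : List Int :=
  (PySem.List.pyRange 0 ((prev.length : Int) - 1) 1).foldl
    (fun row i => row ++ [PySem.List.pyGetD prev (i + 1) 0 - PySem.List.pyGetD prev i 0]) []

def compute_initial_differences (coefficients : List Int) (num_columns : Int) : List Int :=
  let _degree : Int := (coefficients.length : Int) - 1
  let values : List Int := (PySem.List.pyRange 0 num_columns 1).map (pvPolyEvalA coefficients)
  -- A's dead first differencing loop (result discarded by A too; kept for faithfulness)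
  let _differences : List Int :=
    (PySem.List.pyRange 1 num_columns 1).foldl (fun differences _ => pvDiffRowA differences) values
  -- difference table, each row from table[-1]
  let table : List (List Int) :=
    (PySem.List.pyRange 1 num_columns 1).foldl
      (fun table _ => table ++ [pvDiffRowA (PySem.List.pyGetD table (-1) [])]) [values]
  -- "table[i][0] if i < len(table) and table[i] else 0"
  (PySem.List.pyRange 0 num_columns 1).map (fun i =>
    if (i < (table.length : Int) ∧ PySem.List.pyGetD table i [] ≠ []) then
      PySem.List.pyGetD (PySem.List.pyGetD table i []) 0 0
    else 0)

-- ===== PORT B =====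
def pvPolyEvalB (coefficients : List Int) (x : Int) : Int :=
  (PySem.List.enumerate coefficients).foldl (fun result ic => result + ic.2 * x ^ ic.1.toNat) 0

def compute_initial_differences_alt (coefficients : List Int) (num_columns : Int) : List Int :=
  let values : List Int := (PySem.List.pyRange 0 num_columns 1).map (pvPolyEvalB coefficients)
  (PySem.List.pyRange 0 num_columns 1).foldl (fun result k =>
    result ++ [((PySem.List.pyRange 0 (k + 1) 1).foldl
      (fun sc j => (sc.1 + (-1 : Int) ^ (k - j).toNat * sc.2 * PySem.List.pyGetD values j 0,
                    PySem.Int.floordiv (sc.2 * (k - j)) (j + 1))) ((0 : Int), (1 : Int))).1]) []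

-- ===== PRECONDITION & SPEC =====
def Spec_compute_initial_differences (coefficients : List Int) (num_columns : Int) (out : List Int) : Prop := out = compute_initial_differences_alt coefficients num_columns
instance (coefficients : List Int) (num_columns : Int) (out : List Int) : Decidable (Spec_compute_initial_differences coefficients num_columns out) := by unfold Spec_compute_initial_differences; infer_instance

-- ===== CLAIM (what is proved, stated in full; the proofs are below) =====
def Claim_equal_compute_initial_differences : Prop := ∀ (coefficients : List Int) (num_columns : Int), Dom_compute_initial_differences coefficients num_columns → Spec_compute_initial_differences coefficients num_columns (compute_initial_differences coefficients num_columns)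

-- ===== LEMMAS AND PROOFS =====

-- proof-side canonical difference row
def pvDelta (xs : List Int) : List Int := List.zipWith (fun a b => b - a) xs xs.tail

theorem pvDiffRowA_eq (prev : List Int) : pvDiffRowA prev = pvDelta prev := by
  unfold pvDiffRowA
  rw [PySem.List.foldl_append_singleton_eq_map]
  apply List.ext_getElem
  · simp [PySem.List.length_pyRange_one, pvDelta]
  · intro k h1 h2
    have hk : k + 1 < prev.length := by
      simp [PySem.List.length_pyRange_one] at h1; omega
    simp only [List.getElem_map, List.nil_append, PySem.List.getElem_pyRange_one, pvDelta,
      List.getElem_zipWith, List.getElem_tail]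
    rw [PySem.List.pyGetD_eq_getElem prev 0 (by omega) (by omega),
        PySem.List.pyGetD_eq_getElem prev 0 (by omega) (by omega)]
    congr 2 <;> omega

theorem pvDelta_length (xs : List Int) : (pvDelta xs).length = xs.length - 1 := by
  simp [pvDelta]

theorem pvDelta_iter_length (k : Nat) (xs : List Int) :
    (pvDelta^[k] xs).length = xs.length - k := by
  induction k generalizing xs with
  | zero => simp
  | succ k ih => rw [Function.iterate_succ_apply, ih, pvDelta_length]; omega

theorem pvDelta_getD (xs : List Int) (i : Nat) (h : i + 1 < xs.length) :
    (pvDelta xs).getD i 0 = xs.getD (i + 1) 0 - xs.getD i 0 := by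
  have hl : i < (pvDelta xs).length := by simp [pvDelta]; omega
  rw [List.getD_eq_getElem _ _ hl, List.getD_eq_getElem _ _ (by omega),
      List.getD_eq_getElem _ _ (by omega)]
  simp [pvDelta, List.getElem_tail]

-- A's k-th table row head is Mathlib's k-th forward difference of the value function
theorem pvDelta_iter_fwdDiff (k : Nat) (xs : List Int) (f : ℕ → ℤ)
    (hf : ∀ i, i < xs.length → xs.getD i 0 = f i) (i : Nat) (h : i + k < xs.length) :
    (pvDelta^[k] xs).getD i 0 = (fwdDiff (1:ℕ))^[k] f i := by
  induction k generalizing xs f with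
  | zero => exact hf i (by omega)
  | succ k ih =>
    rw [Function.iterate_succ_apply, Function.iterate_succ_apply]
    apply ih (pvDelta xs) (fwdDiff (1:ℕ) f)
    · intro j hj
      rw [pvDelta_length] at hj
      rw [pvDelta_getD xs j (by omega), fwdDiff]
      rw [hf j (by omega), hf (j+1) (by omega)]
    · rw [pvDelta_length]; omega

theorem pvTable_eq (values : List Int) (n : Nat) :
    (PySem.List.pyRange 1 (1 + (n:Int)) 1).foldl
      (fun table _ => table ++ [pvDiffRowA (PySem.List.pyGetD table (-1) [])]) [values]
    = (List.range (n+1)).map (fun k => pvDelta^[k] values) := by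
  induction n with
  | zero => simp [PySem.List.pyRange_one_eq_nil (le_refl 1), List.range_succ]
  | succ n ih =>
    rw [show (1 + ((n+1:Nat):Int)) = (1 + (n:Int)) + 1 by push_cast; ring,
        PySem.List.pyRange_one_succ_right (by omega), List.foldl_append, ih]
    simp only [List.foldl_cons, List.foldl_nil]
    have hsplit : (List.range (n+1)).map (fun k => pvDelta^[k] values)
        = (List.range n).map (fun k => pvDelta^[k] values) ++ [pvDelta^[n] values] := by
      rw [List.range_succ]; simp
    rw [hsplit, PySem.List.pyGetD_neg_one_append_singleton, pvDiffRowA_eq,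
        ← Function.iterate_succ_apply' pvDelta n values,
        List.range_succ (n := n+1), List.map_append, hsplit]
    simp

-- invariant of B's inner loop: the pair is (partial Newton sum, C(k, j))
theorem pvInnerB (values : List Int) (k : Nat) (m : Nat) (hm : m ≤ k + 1) :
    (PySem.List.pyRange 0 (m:Int) 1).foldl
      (fun sc j => (sc.1 + (-1 : Int) ^ ((k:Int) - j).toNat * sc.2 * PySem.List.pyGetD values j 0,
                    PySem.Int.floordiv (sc.2 * ((k:Int) - j)) (j + 1))) ((0 : Int), (1 : Int))
    = (∑ j ∈ Finset.range m, ((-1:Int)^(k-j) * (k.choose j : Int)) * values.getD j 0,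
       (k.choose m : Int)) := by
  induction m with
  | zero => simp [PySem.List.pyRange_one_eq_nil]
  | succ m ih =>
    rw [show ((m+1:Nat):Int) = (m:Int)+1 by push_cast; ring,
        PySem.List.pyRange_one_succ_right (by positivity), List.foldl_append, ih (by omega)]
    simp only [List.foldl_cons, List.foldl_nil]
    have hmk : m ≤ k := by omega
    refine Prod.ext ?_ ?_
    · simp only [Finset.sum_range_succ]
      rw [show ((k:Int) - (m:Int)).toNat = k - m by omega, PySem.List.pyGetD_natCast]
    · simp only
      rw [PySem.Int.floordiv_eq_ediv_of_pos (by positivity)]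
      have hch : (k.choose (m+1) : Int) * ((m:Int)+1) = (k.choose m : Int) * ((k:Int) - m) := by
        have h2 := Nat.choose_succ_right_eq k m
        have h3 := congrArg (fun x : Nat => (x : Int)) h2
        push_cast [Nat.cast_sub hmk] at h3
        linarith
      rw [show (k.choose m : Int) * ((k:Int) - (m:Int)) = (k.choose (m+1) : Int) * ((m:Int)+1) from hch.symm]
      rw [Int.mul_ediv_cancel _ (by positivity)]

-- ===== VERDICT (by name: the statement is the Claim_ definition above) =====
theorem compute_initial_differences_spec : Claim_equal_compute_initial_differences := by
  intro coefficients num_columns _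
  unfold Spec_compute_initial_differences
  unfold compute_initial_differences compute_initial_differences_alt
  dsimp only
  have hpe : pvPolyEvalB = pvPolyEvalA := rfl
  rw [hpe]
  by_cases hnc : num_columns ≤ 0
  · rw [PySem.List.pyRange_one_eq_nil hnc]; rfl
  · push Not at hnc
    set nc := num_columns with hncdef
    set values : List Int := (PySem.List.pyRange 0 nc 1).map (pvPolyEvalA coefficients) with hv
    set f : ℕ → ℤ := fun j => pvPolyEvalA coefficients (j : Int) with hfdef
    have hvform : ∀ j : ℕ, j < nc.toNat → values.getD j 0 = f j := by
      intro j hj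
      rw [hv, List.getD_eq_getElem _ _ (by simp [PySem.List.length_pyRange_one]; omega)]
      simp [PySem.List.getElem_pyRange_one, hfdef]
    have hvlen : values.length = nc.toNat := by
      simp [hv, PySem.List.length_pyRange_one]
    have htable : (PySem.List.pyRange 1 nc 1).foldl
        (fun table _ => table ++ [pvDiffRowA (PySem.List.pyGetD table (-1) [])]) [values]
        = (List.range nc.toNat).map (fun k => pvDelta^[k] values) := by
      have h := pvTable_eq values (nc.toNat - 1)
      rw [show (1 + ((nc.toNat - 1 : Nat) : Int)) = nc by omega,
          show (nc.toNat - 1) + 1 = nc.toNat by omega] at h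
      exact h
    rw [htable, PySem.List.foldl_append_singleton_eq_map]
    simp only [List.nil_append]
    apply List.map_congr_left
    intro i hi
    rw [PySem.List.mem_pyRange_one] at hi
    obtain ⟨hi0, hilt⟩ := hi
    set k : Nat := i.toNat with hkdef
    have hik : i = (k : Int) := by omega
    have hkn : k < nc.toNat := by omega
    -- A side
    have hlen : ((List.range nc.toNat).map (fun k => pvDelta^[k] values)).length = nc.toNat := by simp
    have hgetT : PySem.List.pyGetD ((List.range nc.toNat).map (fun k => pvDelta^[k] values)) i []
        = pvDelta^[k] values := by
      rw [PySem.List.pyGetD_eq_getElem _ _ hi0 (by rw [hlen]; omega)]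
      simp [← hkdef]
    have hrowlen : (pvDelta^[k] values).length = nc.toNat - k := by
      rw [pvDelta_iter_length, hvlen]
    have hne : pvDelta^[k] values ≠ [] := by
      apply List.ne_nil_of_length_pos
      omega
    rw [if_pos ⟨by rw [hlen]; omega, by rw [hgetT]; exact hne⟩, hgetT,
        PySem.List.pyGetD_zero]
    have hA : (pvDelta^[k] values).getD 0 0 = (fwdDiff (1:ℕ))^[k] f 0 :=
      pvDelta_iter_fwdDiff k values f (fun j hj => hvform j (by omega)) 0 (by omega)
    rw [hA, fwdDiff_iter_eq_sum_shift]
    -- B side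
    rw [show i + 1 = ((k+1 : Nat) : Int) by omega, hik, pvInnerB values k (k+1) (le_refl _)]
    apply Finset.sum_congr rfl
    intro j hj
    rw [Finset.mem_range] at hj
    rw [hvform j (by omega), smul_eq_mul]
    have h01 : (0 + j • (1:ℕ)) = j := by simp
    rw [h01, mul_assoc]
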